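-- pv_equiv track=rewrite | github.com/inyokaproject/inyoka | inyoka/portal/forms.py | _feed_count_cleanup
-- ===== SOURCE A (Python) =====
-- def _feed_count_cleanup(n):
--     COUNTS = (10, 20, 30, 50)
--     if n in COUNTS:
--         return n
--     if n < COUNTS[0]:
--         return COUNTS[0]
--     for i in range(len(COUNTS)):
--         if n < COUNTS[i]:
--             return n - COUNTS[i - 1] < COUNTS[i] - n and COUNTS[i - 1] or COUNTS[i]
--     return COUNTS[-1]
-- ===== SOURCE B (Python) =====
-- def _feed_count_cleanup(n):
--     COUNTS = (10, 20, 30, 50)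
--     if n in COUNTS:
--         return n
--     return min(COUNTS, key=lambda c: (abs(n - c), -c))
-- ===== Notes on version B (the rewrite author's own statement) =====
-- stated objective: simpler
-- what changed: Replaces the clamp guard plus explicit adjacent-bracket scan (with its and/or trick and negative-index access) by a single min over COUNTS keyed by (absolute distance, -count), which clamps and breaks ties upward by itself.
import Mathlib
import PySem

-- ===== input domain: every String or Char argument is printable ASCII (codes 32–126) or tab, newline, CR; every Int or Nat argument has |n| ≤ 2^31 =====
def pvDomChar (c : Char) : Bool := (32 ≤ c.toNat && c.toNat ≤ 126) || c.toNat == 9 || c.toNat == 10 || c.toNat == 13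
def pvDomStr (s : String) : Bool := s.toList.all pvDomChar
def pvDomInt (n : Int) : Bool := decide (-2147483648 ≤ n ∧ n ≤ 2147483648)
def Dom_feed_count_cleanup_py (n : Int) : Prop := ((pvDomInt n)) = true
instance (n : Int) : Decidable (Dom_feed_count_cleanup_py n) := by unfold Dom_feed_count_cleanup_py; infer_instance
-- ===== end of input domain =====

-- B replaces A's clamp-and-adjacent-bracket scan by a single min over the allowed counts,
-- keyed by (absolute distance, -count): nearest count, ties toward the larger (objective: simpler).

-- ===== PORT A =====
-- the for-loop over range(len(COUNTS)); [] = loop exhausted -> 'return COUNTS[-1]'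
def pvFeedLoopA (n : Int) (counts : List Int) : List Int → Int
  | [] => PySem.List.pyGetD counts (-1) 0
  | i :: rest =>
    if n < PySem.List.pyGetD counts i 0 then
      -- 'n - COUNTS[i-1] < COUNTS[i] - n and COUNTS[i-1] or COUNTS[i]' (COUNTS[i-1] is always truthy)
      (if n - PySem.List.pyGetD counts (i - 1) 0 < PySem.List.pyGetD counts i 0 - n
       then PySem.List.pyGetD counts (i - 1) 0
       else PySem.List.pyGetD counts i 0)
    else pvFeedLoopA n counts rest

def feed_count_cleanup_py (n : Int) : Int :=
  let counts : List Int := [10, 20, 30, 50]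
  if counts.contains n then n
  else if n < PySem.List.pyGetD counts 0 0 then PySem.List.pyGetD counts 0 0
  else pvFeedLoopA n counts (PySem.List.pyRange 0 (counts.length) 1)

-- ===== PORT B =====
def feed_count_cleanup_py_alt (n : Int) : Int :=
  let counts : List Int := [10, 20, 30, 50]
  if counts.contains n then n
  else (PySem.List.min2? counts (fun c => (n - c).natAbs) (fun c => -c)).getD 0

-- ===== PRECONDITION & SPEC =====
def Spec_feed_count_cleanup_py (n : Int) (out : Int) : Prop := out = feed_count_cleanup_py_alt n
instance (n : Int) (out : Int) : Decidable (Spec_feed_count_cleanup_py n out) := by unfold Spec_feed_count_cleanup_py; infer_instance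

-- ===== CLAIM (what is proved, stated in full; the proofs are below) =====
def Claim_equal_feed_count_cleanup_py : Prop := ∀ (n : Int), Dom_feed_count_cleanup_py n → Spec_feed_count_cleanup_py n (feed_count_cleanup_py n)

-- ===== LEMMAS AND PROOFS =====

-- A's loop, on the concrete COUNTS and under the 'n < COUNTS[0]' guard already handled, as a piecewise value
theorem pvFeedLoopA_counts (n : Int) (h10 : ¬ n < 10) :
    pvFeedLoopA n [10, 20, 30, 50] (PySem.List.pyRange 0 4 1) =
      (if n < 20 then (if n - 10 < 20 - n then 10 else 20)
       else if n < 30 then (if n - 20 < 30 - n then 20 else 30)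
       else if n < 50 then (if n - 30 < 50 - n then 30 else 50)
       else 50) := by
  have hr : PySem.List.pyRange 0 4 1 = [0, 1, 2, 3] := by decide
  rw [hr]
  simp only [pvFeedLoopA, PySem.List.pyGetD, PySem.List.pyGet?, PySem.List.pyIdx?]
  norm_num [show Int.toNat 2 = 2 from rfl, show Int.toNat 1 = 1 from rfl,
    show Int.toNat 3 = 3 from rfl, show Int.toNat 0 = 0 from rfl]
  split_ifs <;> omega

-- B's min over the concrete COUNTS, as a piecewise value
theorem pvMin2_counts (n : Int) :
    (PySem.List.min2? [10, 20, 30, 50] (fun c => (n - c).natAbs) (fun c => (-c : Int))).getD 0 =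
      (if n < 10 then 10
       else if n < 20 then (if n - 10 < 20 - n then 10 else 20)
       else if n < 30 then (if n - 20 < 30 - n then 20 else 30)
       else if n < 50 then (if n - 30 < 50 - n then 30 else 50)
       else 50) := by
  simp only [PySem.List.min2?]
  norm_num
  split_ifs <;>
    (try norm_num) <;> (try split_ifs) <;>
    (try norm_num) <;> (try split_ifs) <;>
    first
      | omega
      | (simp only [Option.getD_some]; try omega)

-- ===== VERDICT (by name: the statement is the Claim_ definition above) =====
theorem feed_count_cleanup_py_spec : Claim_equal_feed_count_cleanup_py := by
  intro n _
  unfold Spec_feed_count_cleanup_py feed_count_cleanup_py feed_count_cleanup_py_alt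
  simp only [List.length_cons, List.length_nil, List.contains_eq_mem, List.mem_cons,
    List.not_mem_nil, or_false, PySem.List.pyGetD, PySem.List.pyGet?, PySem.List.pyIdx?]
  norm_num [show Int.toNat 0 = 0 from rfl]
  by_cases hm : n = 10 ∨ n = 20 ∨ n = 30 ∨ n = 50
  · rw [if_pos hm, if_pos hm]
  · rw [if_neg hm, if_neg hm, pvMin2_counts]
    by_cases h10 : n < 10
    · rw [if_pos h10, if_pos h10]
    · rw [if_neg h10, pvFeedLoopA_counts n h10, if_neg h10]
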